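-- pv_equiv track=rewrite | github.com/MarcKletz/OMR-MeasureRecognition | Python/TwoNN_SystemMeasures_Staves_To_StaveMeasures.py | get_systems_with_index
-- ===== SOURCE A (Python) =====
-- def sort_by_x(elem):
--     return elem[1]
--
-- def get_systems_with_index(system_boxes):
--     array = []
--     threshold = 40
--     ref_y = 0
--     group_array = []
--
--     idx = 0
--     for box in system_boxes:
--         if box[1] > ref_y + threshold:
--             if len(group_array) != 0:
--                 group_array.sort(key=sort_by_x)
--                 array.append(group_array)
--                 idx += 1
--             group_array = []
--             group_array.append([idx, box[0], box[1], box[2], box[3]])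
--             ref_y = box[1]
--         else:
--             group_array.append([idx, box[0], box[1], box[2], box[3]])
--
--     group_array.sort(key=sort_by_x)
--     array.append(group_array)
--
--     return array
-- ===== SOURCE B (Python) =====
-- def get_systems_with_index(system_boxes):
--     # Span-based segmentation: instead of a per-element state machine, repeatedly
--     # split off a maximal run of boxes whose y fits within the group leader's
--     # y + 40, then label and sort each run.
--     def span(pred, xs):
--         k = 0
--         while k < len(xs) and pred(xs[k]):
--             k += 1
--         return xs[:k], xs[k:]
--
--     lead, rest = span(lambda b: b[1] <= 40, system_boxes)
--     groups = [lead] if (lead or not rest) else []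
--     while rest:
--         head, tail = rest[0], rest[1:]
--         run, rest = span(lambda b: b[1] <= head[1] + 40, tail)
--         groups.append([head] + run)
--     return [sorted(([i, b[0], b[1], b[2], b[3]] for b in g), key=lambda r: r[1])
--             for i, g in enumerate(groups)]
-- ===== Notes on version B (the rewrite author's own statement) =====
-- stated objective: alternative
-- what changed: A runs a per-element state machine (ref_y, current group, index counter) interleaving sorting and appending; B has no running state: it repeatedly splits the list with a span (maximal run with y <= leader's y + 40) to obtain the groups, then labels each group with enumerate and sorts it by x.
import Mathlib
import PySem

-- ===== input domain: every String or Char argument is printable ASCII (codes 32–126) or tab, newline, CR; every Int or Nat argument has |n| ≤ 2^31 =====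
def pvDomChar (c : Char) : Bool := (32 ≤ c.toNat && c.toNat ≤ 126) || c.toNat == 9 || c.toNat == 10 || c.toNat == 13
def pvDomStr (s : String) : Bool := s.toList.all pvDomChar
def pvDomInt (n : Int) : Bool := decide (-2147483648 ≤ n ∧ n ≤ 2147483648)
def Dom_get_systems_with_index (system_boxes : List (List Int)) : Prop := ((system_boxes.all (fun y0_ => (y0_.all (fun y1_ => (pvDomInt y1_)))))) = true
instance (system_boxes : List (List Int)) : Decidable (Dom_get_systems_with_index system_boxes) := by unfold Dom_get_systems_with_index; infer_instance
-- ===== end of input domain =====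

-- B replaces A's per-element state machine by repeated span splits (maximal runs by the
-- leader's y + 40), then labels each group with enumerate and sorts it (objective: alternative).

-- row [i, box[0], box[1], box[2], box[3]]; box[j] ported as pyGetD box j 0 — exact under
-- Pre_ (every box has ≥ 4 entries; Python raises IndexError otherwise)
def pvRow (i : Int) (b : List Int) : List Int :=
  [i, PySem.List.pyGetD b 0 0, PySem.List.pyGetD b 1 0, PySem.List.pyGetD b 2 0, PySem.List.pyGetD b 3 0]

-- port of A's helper sort_by_x (elem[1]); also the sort key / y access in B
def pvKey (e : List Int) : Int := PySem.List.pyGetD e 1 0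

-- ===== PORT A =====
-- loop state: (array, ref_y, group_array, idx); threshold = 40
def pvAStep (st : List (List (List Int)) × Int × List (List Int) × Int) (box : List Int) :
    List (List (List Int)) × Int × List (List Int) × Int :=
  let (array, ref_y, group_array, idx) := st
  if PySem.List.pyGetD box 1 0 > ref_y + 40 then
    if group_array.length != 0 then
      let g := PySem.List.sorted group_array pvKey
      (array ++ [g], PySem.List.pyGetD box 1 0, [pvRow (idx + 1) box], idx + 1)
    else
      (array, PySem.List.pyGetD box 1 0, [pvRow idx box], idx)
  else
    (array, ref_y, group_array ++ [pvRow idx box], idx)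

def get_systems_with_index (system_boxes : List (List Int)) : List (List (List Int)) :=
  let st := system_boxes.foldl pvAStep ([], 0, [], 0)
  st.1 ++ [PySem.List.sorted st.2.2.1 pvKey]

-- ===== PORT B =====
-- Source B's span(pred, xs) returns the maximal satisfying prefix and the remainder:
-- (takeWhile, dropWhile); its predicates are 'b[1] <= ref + 40'
def pvP (ry : Int) (b : List Int) : Bool := decide (pvKey b ≤ ry + 40)

-- the while loop: peel off head and its run (y <= head's y + 40), group = [head] + run
def pvGroups : List (List Int) → List (List (List Int))
  | [] => []
  | head :: tail =>
      (head :: tail.takeWhile (pvP (pvKey head)))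
        :: pvGroups (tail.dropWhile (pvP (pvKey head)))
termination_by l => l.length
decreasing_by
  simpa using Nat.lt_succ_of_le (List.length_dropWhile_le _ _)

-- final comprehension: label each group with enumerate and sort by x
def pvFin (groups : List (List (List Int))) : List (List (List Int)) :=
  (PySem.List.enumerate groups).map (fun p => PySem.List.sorted (p.2.map (pvRow p.1)) pvKey)

def get_systems_with_index_alt (system_boxes : List (List Int)) : List (List (List Int)) :=
  let lead := system_boxes.takeWhile (pvP 0)
  let rest := system_boxes.dropWhile (pvP 0)
  let groups := (if lead ≠ [] ∨ rest = [] then [lead] else []) ++ pvGroups rest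
  pvFin groups

-- ===== PRECONDITION & SPEC =====
-- Pre_ excludes inputs containing a box with fewer than 4 entries: there Python A (and B)
-- raises IndexError on box[1]..box[3] instead of returning.
def Pre_get_systems_with_index (system_boxes : List (List Int)) : Prop :=
  ∀ b ∈ system_boxes, 4 ≤ b.length
instance (system_boxes : List (List Int)) : Decidable (Pre_get_systems_with_index system_boxes) := by unfold Pre_get_systems_with_index; infer_instance

def pvWitness_get_systems_with_index : List (List Int) := [[10, 50, 20, 30], [5, 120, 25, 35]]

def Spec_get_systems_with_index (system_boxes : List (List Int)) (out : List (List (List Int))) : Prop := out = get_systems_with_index_alt system_boxes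
instance (system_boxes : List (List Int)) (out : List (List (List Int))) : Decidable (Spec_get_systems_with_index system_boxes out) := by unfold Spec_get_systems_with_index; infer_instance

-- ===== CLAIM (what is proved, stated in full; the proofs are below) =====
def Claim_equal_get_systems_with_index : Prop := ∀ (system_boxes : List (List Int)), Dom_get_systems_with_index system_boxes → Pre_get_systems_with_index system_boxes → Spec_get_systems_with_index system_boxes (get_systems_with_index system_boxes)

-- ===== LEMMAS AND PROOFS =====

-- finalizing one more closed group
lemma pvFin_append (gs : List (List (List Int))) (c : List (List Int)) :
    pvFin (gs ++ [c]) = pvFin gs ++ [PySem.List.sorted (c.map (pvRow gs.length)) pvKey] := by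
  simp [pvFin, PySem.List.enumerate_append, PySem.List.enumerate_cons, PySem.List.enumerate_nil]

-- the first element surviving dropWhile fails the predicate
lemma pv_dropWhile_head_false {A : Type} (p : A → Bool) :
    ∀ (l : List A) (h : A) (t : List A), l.dropWhile p = h :: t → p h = false := by
  intro l
  induction l with
  | nil => intro h t hd; simp [List.dropWhile] at hd
  | cons a as ih =>
    intro h t hd
    by_cases hp : p a = true
    · rw [List.dropWhile_cons_of_pos hp] at hd; exact ih h t hd
    · rw [List.dropWhile_cons_of_neg hp] at hd
      cases hd; simpa using hp

-- A's loop over boxes that all stay in the current group only appends rows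
lemma pvA_prefix (pre : List (List Int)) (arr : List (List (List Int))) (ry : Int)
    (cur : List (List Int)) (idx : Int) (h : ∀ b ∈ pre, pvKey b ≤ ry + 40) :
    pre.foldl pvAStep (arr, ry, cur, idx) = (arr, ry, cur ++ pre.map (pvRow idx), idx) := by
  induction pre generalizing cur with
  | nil => simp
  | cons b rest ih =>
    have hb : ¬ (PySem.List.pyGetD b 1 0 > ry + 40) := by
      have := h b (by simp); simpa [pvKey] using this
    simp only [List.foldl_cons, pvAStep, if_neg hb]
    rw [ih (cur ++ [pvRow idx b]) (fun x hx => h x (List.mem_cons_of_mem _ hx))]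
    simp

-- main invariant: from a state with a nonempty current group, A's loop produces
-- exactly the span-segmentation groups
lemma pvA_run (boxes : List (List Int)) (gs : List (List (List Int))) (ry : Int)
    (cur : List (List Int)) (hcur : cur ≠ []) :
    (fun st : List (List (List Int)) × Int × List (List Int) × Int =>
        st.1 ++ [PySem.List.sorted st.2.2.1 pvKey])
      (boxes.foldl pvAStep (pvFin gs, ry, cur.map (pvRow gs.length), (gs.length : Int)))
    = pvFin (gs ++ (cur ++ boxes.takeWhile (pvP ry)) :: pvGroups (boxes.dropWhile (pvP ry))) := by
  have hsplit : boxes = boxes.takeWhile (pvP ry) ++ boxes.dropWhile (pvP ry) :=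
    (List.takeWhile_append_dropWhile).symm
  have hstep : boxes.foldl pvAStep (pvFin gs, ry, cur.map (pvRow gs.length), (gs.length : Int))
      = (boxes.dropWhile (pvP ry)).foldl pvAStep
          (pvFin gs, ry, (cur ++ boxes.takeWhile (pvP ry)).map (pvRow gs.length), (gs.length : Int)) := by
    conv_lhs => rw [hsplit]
    rw [List.foldl_append,
      pvA_prefix (boxes.takeWhile (pvP ry)) (pvFin gs) ry (cur.map (pvRow gs.length))
        (gs.length : Int)
        (by intro b hb; have := List.mem_takeWhile_imp hb; simpa [pvP] using this)]
    simp
  rw [hstep]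
  cases hdw : boxes.dropWhile (pvP ry) with
  | nil =>
      simp only [List.foldl_nil]
      simp [pvGroups, pvFin_append]
  | cons h t =>
      have hgt : PySem.List.pyGetD h 1 0 > ry + 40 := by
        have := pv_dropWhile_head_false (pvP ry) boxes h t hdw
        simp [pvP, pvKey] at this
        omega
      have hne : ((cur ++ boxes.takeWhile (pvP ry)).map (pvRow gs.length)).length ≠ 0 := by
        simp [hcur]
      simp only [List.foldl_cons, pvAStep, if_pos hgt]
      rw [if_pos (by simpa using hne)]
      have hlen : ((gs ++ [cur ++ boxes.takeWhile (pvP ry)]).length : Int) = (gs.length : Int) + 1 := by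
        simp
      have := pvA_run t (gs ++ [cur ++ boxes.takeWhile (pvP ry)]) (PySem.List.pyGetD h 1 0) [h]
        (by simp)
      simp only [List.map_cons, List.map_nil, hlen, pvFin_append] at this
      rw [this, pvGroups]
      simp only [pvKey, List.append_assoc, List.cons_append, List.nil_append]
termination_by boxes.length
decreasing_by
  have : boxes.takeWhile (pvP ry) ++ h :: t = boxes := by rw [← hdw]; exact List.takeWhile_append_dropWhile
  have := congrArg List.length this
  simp at this
  omega

-- ===== VERDICT (by name: the statement is the Claim_ definition above) =====
theorem get_systems_with_index_spec : Claim_equal_get_systems_with_index := by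
  intro xs _ _
  unfold Spec_get_systems_with_index get_systems_with_index get_systems_with_index_alt
  have hsplit : xs.takeWhile (pvP 0) ++ xs.dropWhile (pvP 0) = xs :=
    List.takeWhile_append_dropWhile
  have htw : ∀ b ∈ xs.takeWhile (pvP 0), pvKey b ≤ 0 + 40 := by
    intro b hb
    have := List.mem_takeWhile_imp hb
    simp [pvP, pvKey] at this
    simpa [pvKey] using this
  cases hdw : xs.dropWhile (pvP 0) with
  | nil =>
      have hall : xs.takeWhile (pvP 0) = xs := by
        rw [hdw] at hsplit; simpa using hsplit
      have := pvA_prefix xs [] 0 [] 0 (by rw [← hall]; exact htw)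
      simp only [List.nil_append] at this
      simp [this, hall, pvGroups, pvFin,
        PySem.List.enumerate_cons, PySem.List.enumerate_nil]
  | cons h t =>
      have hxs : xs = xs.takeWhile (pvP 0) ++ h :: t := by rw [← hdw, hsplit]
      have hgt : PySem.List.pyGetD h 1 0 > 0 + 40 := by
        have := pv_dropWhile_head_false (pvP 0) xs h t hdw
        simp [pvP, pvKey] at this
        omega
      conv_lhs => rw [hxs]
      rw [List.foldl_append, pvA_prefix _ _ _ _ _ htw]
      cases htwe : xs.takeWhile (pvP 0) with
      | nil =>
          -- lead empty: first box starts group 0 (cur empty branch)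
          simp only [List.nil_append, List.map_nil, List.foldl_cons, pvAStep, if_pos hgt]
          rw [if_neg (by simp)]
          have := pvA_run t [] (PySem.List.pyGetD h 1 0) [h] (by simp)
          simp only [pvFin, PySem.List.enumerate_nil, List.map_nil, List.length_nil,
            Nat.cast_zero, List.nil_append, List.map_cons] at this
          rw [this, pvGroups]
          simp [pvFin, PySem.List.enumerate_cons, pvKey]
      | cons l ls =>
          -- lead nonempty: first box of rest closes group 0
          simp only [List.nil_append, List.foldl_cons, pvAStep, if_pos hgt]
          rw [if_pos (by simp)]
          have := pvA_run t [l :: ls] (PySem.List.pyGetD h 1 0) [h] (by simp)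
          have hl1 : (([l :: ls] : List (List (List Int))).length : Int) = 1 := by simp
          simp only [hl1, List.map_cons, List.map_nil] at this
          have hfin1 : pvFin [l :: ls] = [PySem.List.sorted ((l :: ls).map (pvRow 0)) pvKey] := by
            simp [pvFin, PySem.List.enumerate_cons, PySem.List.enumerate_nil]
          rw [hfin1] at this
          rw [show ((0 : Int) + 1 = 1) from rfl]
          rw [this, pvGroups]
          simp [pvFin, PySem.List.enumerate_cons, pvKey]
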